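-- pv_equiv track=rewrite | github.com/hyunjinkim-developer/InformationSecurity2021Fall | Simplified-AES.py | EnMultiply
-- ===== SOURCE A (Python) =====
-- def EnMultiply(converter, matrix):
--     multiplied = []
--     for coefblock in converter:
--         converting = []
--         for coef in coefblock:
--             converting.append(matrix[coef])
--         multiplied.append(converting)
--     return MCXOR(multiplied)
--
-- def MCXOR(multiplied):
--     coefficientlist = []
--     for coef in multiplied:
--         idx = 0
--         while idx < len(coef)-1:
--             if coef[idx] == coef[idx+1]:
--                 coef[idx+1] = "0"
--             else:
--                 coef[idx+1] = "1"
--             idx += 1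
--         coefficientlist.append(coef[-1])
--     return "".join(coefficientlist)
-- ===== SOURCE B (Python) =====
-- def EnMultiply(converter, matrix):
--     # One fused pass: no intermediate 'multiplied' matrix; map + XOR-chain fold per block.
--     out = []
--     for block in converter:
--         acc = matrix[block[0]]
--         for coef in block[1:]:
--             acc = "0" if acc == matrix[coef] else "1"
--         out.append(acc)
--     return "".join(out)
-- ===== Notes on version B (the rewrite author's own statement) =====
-- stated objective: simpler
-- what changed: B drops the materialised intermediate 'multiplied' matrix and the in-place while-loop mutation of each row, fusing the table lookup and the XOR equality-chain into one accumulator fold per block.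
import Mathlib
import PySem

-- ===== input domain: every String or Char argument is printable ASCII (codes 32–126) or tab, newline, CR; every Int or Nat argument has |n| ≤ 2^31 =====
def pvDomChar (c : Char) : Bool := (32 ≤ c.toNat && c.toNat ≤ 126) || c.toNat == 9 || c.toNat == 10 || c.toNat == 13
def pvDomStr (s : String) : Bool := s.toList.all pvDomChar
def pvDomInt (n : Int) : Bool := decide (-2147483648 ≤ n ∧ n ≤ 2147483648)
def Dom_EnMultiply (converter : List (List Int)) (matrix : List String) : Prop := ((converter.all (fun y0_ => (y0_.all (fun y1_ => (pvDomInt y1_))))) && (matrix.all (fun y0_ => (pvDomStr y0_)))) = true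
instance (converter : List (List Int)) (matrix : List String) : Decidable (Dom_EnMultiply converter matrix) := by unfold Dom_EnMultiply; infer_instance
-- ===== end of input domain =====

-- B fuses A's two passes (materialise the mapped matrix, then XOR-chain each row in place)
-- into one traversal per block with a string accumulator; same return value on Pre_.

-- ===== PORT A =====
-- the while loop of MCXOR: mutates coef by `coef[idx+1] = "0"/"1"` until idx = len(coef)-1
def pvWhileXor (coef : List String) (idx : Nat) : List String :=
  if idx < coef.length - 1 then
    pvWhileXor
      (coef.set (idx+1) (if coef.getD idx "" = coef.getD (idx+1) "" then "0" else "1"))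
      (idx+1)
  else coef
termination_by coef.length - idx
decreasing_by simp only [List.length_set]; omega

-- MCXOR(multiplied): run the while loop on each row, take coef[-1] (IndexError on an
-- empty row is excluded by Pre_EnMultiply; the getD "" default is never reached there)
def pvMCXOR (multiplied : List (List String)) : String :=
  PySem.Str.join "" (multiplied.map (fun coef =>
    ((PySem.List.pyGet? (pvWhileXor coef 0) (-1)).getD "")))

def EnMultiply (converter : List (List Int)) (matrix : List String) : String :=
  pvMCXOR (converter.map (fun coefblock =>
    coefblock.map (fun coef => (PySem.List.pyGet? matrix coef).getD "")))

-- ===== PORT B =====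
-- acc = matrix[block[0]]; for coef in block[1:]: acc = "0" if acc == matrix[coef] else "1"
def pvAltBlock (matrix : List String) (block : List Int) : String :=
  match block with
  | [] => ""   -- matrix[block[0]] raises IndexError; excluded by Pre_EnMultiply
  | c :: rest =>
    rest.foldl
      (fun acc coef => if acc = (PySem.List.pyGet? matrix coef).getD "" then "0" else "1")
      ((PySem.List.pyGet? matrix c).getD "")

def EnMultiply_alt (converter : List (List Int)) (matrix : List String) : String :=
  PySem.Str.join "" (converter.map (pvAltBlock matrix))

-- ===== PRECONDITION & SPEC =====
-- Pre_ excludes exactly the inputs where the Python A raises IndexError: an empty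
-- coefficient block (A's coef[-1]) or a coefficient out of range as an index into matrix.
def Pre_EnMultiply (converter : List (List Int)) (matrix : List String) : Prop :=
  ∀ b ∈ converter, b ≠ [] ∧ ∀ c ∈ b, -(matrix.length : Int) ≤ c ∧ c < (matrix.length : Int)
instance (converter : List (List Int)) (matrix : List String) : Decidable (Pre_EnMultiply converter matrix) := by unfold Pre_EnMultiply; infer_instance

def pvWitness_EnMultiply : List (List Int) × List String := ([[0], [1, 0], [-1, 1, 0]], ["1", "0"])

def Spec_EnMultiply (converter : List (List Int)) (matrix : List String) (out : String) : Prop := out = EnMultiply_alt converter matrix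
instance (converter : List (List Int)) (matrix : List String) (out : String) : Decidable (Spec_EnMultiply converter matrix out) := by unfold Spec_EnMultiply; infer_instance

-- ===== CLAIM (what is proved, stated in full; the proofs are below) =====
def Claim_equal_EnMultiply : Prop := ∀ (converter : List (List Int)) (matrix : List String), Dom_EnMultiply converter matrix → Pre_EnMultiply converter matrix → Spec_EnMultiply converter matrix (EnMultiply converter matrix)

-- ===== LEMMAS AND PROOFS =====

-- the chain step used by both sides
def pvStep (acc s : String) : String := if acc = s then "0" else "1"

-- invariant of the while loop: the last element of the result is the fold of the chain
-- step over the suffix, started at the current element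
theorem pvWhileXor_last (coef : List String) (idx : Nat) (h : idx < coef.length) :
    (pvWhileXor coef idx).getLast? =
      some ((coef.drop (idx+1)).foldl pvStep (coef.getD idx "")) := by
  fun_induction pvWhileXor coef idx with
  | case1 coef idx hlt ih =>
    simp only [dite_eq_ite] at ih
    have h1 : idx + 1 < coef.length := by omega
    rw [ih (by simpa using h1)]
    have hset : (coef.set (idx+1) (if coef.getD idx "" = coef.getD (idx+1) "" then "0" else "1")).getD (idx+1) ""
        = pvStep (coef.getD idx "") (coef.getD (idx+1) "") := by
      simp [List.getD, h1, pvStep]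
    rw [hset]
    have hdrop : (coef.set (idx+1) (if coef.getD idx "" = coef.getD (idx+1) "" then "0" else "1")).drop (idx+2)
        = coef.drop (idx+2) := by
      apply List.ext_getElem <;> simp [List.getElem_drop, List.getElem_set] <;> omega
    rw [hdrop]
    have : coef.drop (idx+1) = coef.getD (idx+1) "" :: coef.drop (idx+2) := by
      rw [List.getD_eq_getElem _ _ h1, List.drop_eq_getElem_cons h1]
    rw [this, List.foldl_cons]
  | case2 coef idx hge =>
    have hidx : idx = coef.length - 1 := by omega
    have hdrop : coef.drop (idx+1) = [] := by
      apply List.drop_eq_nil_of_le; omega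
    rw [hdrop, List.foldl_nil, List.getLast?_eq_getElem?, hidx]
    simp [List.getD, List.getElem?_eq_getElem (show coef.length - 1 < coef.length by omega)]

-- per-block: A's while-loop-then-last equals B's fused fold
theorem pvBlock_eq (matrix : List String) (block : List Int) (hb : block ≠ []) :
    (PySem.List.pyGet? (pvWhileXor (block.map (fun coef => (PySem.List.pyGet? matrix coef).getD "")) 0) (-1)).getD ""
      = pvAltBlock matrix block := by
  obtain ⟨c, rest, rfl⟩ := List.exists_cons_of_ne_nil hb
  rw [PySem.List.pyGet?_neg_one]
  rw [pvWhileXor_last _ 0 (by simp)]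
  simp only [List.map_cons, List.drop_succ_cons, List.drop_zero, List.getD,
    List.getElem?_cons_zero, Option.getD_some, pvAltBlock, List.foldl_map, pvStep]

-- ===== VERDICT (by name: the statement is the Claim_ definition above) =====
theorem EnMultiply_spec : Claim_equal_EnMultiply := by
  intro converter matrix _ hpre
  unfold Spec_EnMultiply EnMultiply EnMultiply_alt pvMCXOR
  rw [List.map_map]
  congr 1
  apply List.map_congr_left
  intro b hb
  exact pvBlock_eq matrix b (hpre b hb).1
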